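-- pv_equiv track=rewrite | github.com/MaxLarose/k-irreducible-sums---Python-scripts | Compute_F(k).py | admits_subsum_with_total_dividing_k
-- ===== SOURCE A (Python) =====
-- import itertools
--
-- def divides(x, y):
--     return y % x == 0
--
-- def proper_divisors(k):
--     # Define D to be an empty list. It will represent the list of all proper divisors
--     # of k.
--     D = []
--     for i in range(1, k):
--         if divides(i, k):
--             D.append(i)
--     return D
--
-- def corresponding_sum_total(x, k):
--     D = proper_divisors(k)
--     n = len(D)
--     sum = 0
--     for i in range(0, n):
--         sum += x[i] * D[i]
--     return sum
--
-- def admits_subsum_with_total_dividing_k(x, k):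
--     D = proper_divisors(k)
--     n = len(D)
--     I = []  # The entries of the list I will be the closed intervals [1, x_i] for 0<=i<=n.
--     for i in range(0, n):
--         I.append([*range(0, x[i] + 1)])
--     X = list(itertools.product(*I))  # A list representing the cartesian product of
--     # every interval in I.
--
--     # Define Y to be the sublist of X obtained by removing the vector [0,...,0] as well
--     # as any vector of the form [0, ..., 0, 1, 0, ..., 0] (i.e. any vector with a
--     # 1-norm less than 2) as we are only interested in non-trivial subsums.
--     Y = []
--     for x in X:
--         if sum(x) > 1:
--             Y.append(x)
--     # We check the total of the sums corresponding to each vector in X. If one of the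
--     # totals is a divisor of k, then the function returns True. Otherwise it returns
--     # False.
--     for y in Y:
--         if divides(corresponding_sum_total(y, k), k):
--             return True
--     return False
-- ===== SOURCE B (Python) =====
-- def admits_subsum_with_total_dividing_k(x, k):
--     # Depth-first backtracking over coefficient choices for each proper divisor of k,
--     # instead of materializing the full cartesian product and filtering it.
--     divisors = [d for d in range(1, k) if k % d == 0]
--     pairs = list(zip(x, divisors))
--
--     def rec(ps, total, cnt):
--         if not ps:
--             return cnt >= 2 and k % total == 0
--         (bound, d) = ps[0]
--         rest = ps[1:]
--         return any(rec(rest, total + c * d, cnt + c) for c in range(bound + 1))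
--
--     return rec(pairs, 0, 0)
-- ===== Notes on version B (the rewrite author's own statement) =====
-- stated objective: alternative
-- what changed: Replaces A's materialization of the full cartesian product of intervals plus a filter pass and a scan with a depth-first backtracking recursion over (bound, divisor) pairs that threads the running total and coefficient count and short-circuits on the first hit, never building the product, the filtered list, or re-deriving the divisor list per candidate.
import Mathlib
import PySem

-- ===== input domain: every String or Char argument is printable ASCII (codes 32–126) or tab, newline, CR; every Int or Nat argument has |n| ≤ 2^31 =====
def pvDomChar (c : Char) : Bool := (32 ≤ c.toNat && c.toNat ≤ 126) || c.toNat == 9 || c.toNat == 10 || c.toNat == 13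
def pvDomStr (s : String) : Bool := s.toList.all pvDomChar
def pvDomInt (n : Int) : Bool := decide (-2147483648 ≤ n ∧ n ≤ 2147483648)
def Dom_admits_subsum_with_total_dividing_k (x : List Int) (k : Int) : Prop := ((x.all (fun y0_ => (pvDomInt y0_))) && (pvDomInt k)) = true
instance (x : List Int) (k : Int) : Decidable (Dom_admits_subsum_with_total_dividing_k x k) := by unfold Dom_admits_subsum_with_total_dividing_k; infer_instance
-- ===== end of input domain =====

-- B replaces A's materialized cartesian product + filter + scan by a depth-first
-- backtracking recursion over (bound, divisor) pairs (objective: alternative).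


-- ===== PORT A =====
def pvDivides (a b : Int) : Bool := PySem.Int.mod b a == 0

def pvProperDivisors (k : Int) : List Int :=
  (PySem.List.pyRange 1 k 1).foldl (fun D i => if pvDivides i k then D ++ [i] else D) []

def pvCorrespondingSumTotal (y : List Int) (k : Int) : Int :=
  let D := pvProperDivisors k
  let n := PySem.List.len D
  (PySem.List.pyRange 0 n 1).foldl
    (fun s i => s + PySem.List.pyGetD y i 0 * PySem.List.pyGetD D i 0) 0

-- itertools.product over a list of factors (leftmost factor outermost, as in Python)
def pvProd : List (List Int) → List (List Int)
  | [] => [[]]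
  | l :: ls => l.flatMap (fun a => (pvProd ls).map (fun v => a :: v))

def admits_subsum_with_total_dividing_k (x : List Int) (k : Int) : Bool :=
  let D := pvProperDivisors k
  let n := PySem.List.len D
  let I := (PySem.List.pyRange 0 n 1).foldl
    (fun I i => I ++ [PySem.List.pyRange 0 (PySem.List.pyGetD x i 0 + 1) 1]) []
  let X := pvProd I
  let Y := X.foldl (fun Y v => if v.sum > 1 then Y ++ [v] else Y) []
  Y.any (fun y => pvDivides (pvCorrespondingSumTotal y k) k)

-- ===== PORT B =====
def pvRecB (k : Int) : List (Int × Int) → Int → Int → Bool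
  | [], total, cnt => decide (cnt ≥ 2) && (PySem.Int.mod k total == 0)
  | (b, d) :: rest, total, cnt =>
      (PySem.List.pyRange 0 (b + 1) 1).any (fun c => pvRecB k rest (total + c * d) (cnt + c))

def admits_subsum_with_total_dividing_k_alt (x : List Int) (k : Int) : Bool :=
  let divisors := (PySem.List.pyRange 1 k 1).filter (fun d => PySem.Int.mod k d == 0)
  pvRecB k (x.zip divisors) 0 0

-- ===== PRECONDITION & SPEC =====
-- helpers for Pre_: divisor counting in O(√k) so the precondition is cheap to decide
def pvSmallCount (m : Nat) : Nat :=
  ((List.range' 1 (Nat.sqrt m)).filter (fun d => m % d == 0)).length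

def pvNumProperDivisors (m : Nat) : Nat :=
  2 * pvSmallCount m - (if Nat.sqrt m * Nat.sqrt m = m then 1 else 0) - 1

-- A raises IndexError (indexing x) iff x is shorter than the list of proper divisors of k;
-- the count is computed by √k divisor pairing (proved equal to A's list below, pv_pre_iff).
def Pre_admits_subsum_with_total_dividing_k (x : List Int) (k : Int) : Prop :=
  2 ≤ k → pvNumProperDivisors k.toNat ≤ x.length
instance (x : List Int) (k : Int) : Decidable (Pre_admits_subsum_with_total_dividing_k x k) := by
  unfold Pre_admits_subsum_with_total_dividing_k; infer_instance

def pvWitness_admits_subsum_with_total_dividing_k : List Int × Int := ([], 0)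

def Spec_admits_subsum_with_total_dividing_k (x : List Int) (k : Int) (out : Bool) : Prop := out = admits_subsum_with_total_dividing_k_alt x k
instance (x : List Int) (k : Int) (out : Bool) : Decidable (Spec_admits_subsum_with_total_dividing_k x k out) := by unfold Spec_admits_subsum_with_total_dividing_k; infer_instance

-- ===== CLAIM (what is proved, stated in full; the proofs are below) =====
def Claim_equal_admits_subsum_with_total_dividing_k : Prop := ∀ (x : List Int) (k : Int), Dom_admits_subsum_with_total_dividing_k x k → Pre_admits_subsum_with_total_dividing_k x k → Spec_admits_subsum_with_total_dividing_k x k (admits_subsum_with_total_dividing_k x k)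

-- ===== LEMMAS AND PROOFS =====

lemma pv_filter_range'_card (n : Nat) (p : Nat → Bool) :
    ((List.range' 1 n).filter p).length = ((Finset.Icc 1 n).filter (fun d => p d = true)).card := by
  rw [← Finset.Ico_add_one_right_eq_Icc]
  have h1 : (List.range' 1 n).Nodup := List.nodup_range'
  rw [← List.toFinset_card_of_nodup (h1.filter p), List.toFinset_filter]
  congr 1
  ext d; simp [List.mem_range'_1]; omega

lemma pv_card_divisors_sqrt (m : Nat) (hm : 1 ≤ m) :
    m.divisors.card = 2 * pvSmallCount m - (if Nat.sqrt m * Nat.sqrt m = m then 1 else 0) := by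
  obtain ⟨s, hs⟩ : ∃ s, Nat.sqrt m = s := ⟨_, rfl⟩
  have hs1 : 1 ≤ s := hs ▸ Nat.le_sqrt'.mpr (by omega)
  have hsm : s ≤ m := hs ▸ Nat.sqrt_le_self m
  have hss : s * s ≤ m := hs ▸ Nat.sqrt_le m
  have hlt : m < (s + 1) * (s + 1) := hs ▸ Nat.lt_succ_sqrt m
  have m0 : m ≠ 0 := by omega
  -- the count of divisors up to √m is pvSmallCount
  have hsc : pvSmallCount m = ((Finset.Icc 1 s).filter (fun d => d ∣ m)).card := by
    rw [pvSmallCount, hs, pv_filter_range'_card]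
    congr 1
    refine Finset.filter_congr (fun d _ => ?_)
    simp [beq_iff_eq, Nat.dvd_iff_mod_eq_zero]
  -- split the divisors at √m
  have e1 : m.divisors.card = ((Finset.Icc 1 s).filter (fun d => d ∣ m)).card
      + ((Finset.Ioc s m).filter (fun d => d ∣ m)).card := by
    rw [← Finset.card_union_of_disjoint (by
      refine Finset.disjoint_filter_filter ?_
      simp only [Finset.disjoint_left, Finset.mem_Icc, Finset.mem_Ioc]
      omega)]
    congr 1
    rw [Nat.divisors, ← Finset.filter_union]
    congr 1
    ext y; simp only [Finset.mem_Ico, Finset.mem_union, Finset.mem_Icc, Finset.mem_Ioc]; omega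
  -- big divisors biject (d ↦ m / d) with small divisors of big codivisor
  have e2 : ((Finset.Ioc s m).filter (fun d => d ∣ m)).card
      = (((Finset.Icc 1 s).filter (fun d => d ∣ m)).filter (fun e => s < m / e)).card := by
    refine Finset.card_nbij' (fun d => m / d) (fun e => m / e) ?_ ?_ ?_ ?_
    · intro d hd
      simp only [Finset.mem_coe, Finset.mem_filter, Finset.mem_Ioc] at hd
      obtain ⟨⟨hsd, hdm⟩, hdvd⟩ := hd
      have h1 : 0 < m / d := Nat.div_pos hdm (by omega)
      have h2 : m / d ≤ m / (s + 1) := Nat.div_le_div_left (by omega) (by omega)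
      have h3 : m / (s + 1) < s + 1 := (Nat.div_lt_iff_lt_mul (by omega)).mpr hlt
      simp only [Finset.mem_coe, Finset.mem_filter, Finset.mem_Icc]
      refine ⟨⟨⟨by omega, by omega⟩, Nat.div_dvd_of_dvd hdvd⟩, ?_⟩
      rw [Nat.div_div_self hdvd m0]; exact hsd
    · intro e he
      simp only [Finset.mem_coe, Finset.mem_filter, Finset.mem_Icc] at he
      obtain ⟨⟨⟨he1, hes⟩, hdvd⟩, hse⟩ := he
      simp only [Finset.mem_coe, Finset.mem_filter, Finset.mem_Ioc]
      exact ⟨⟨hse, Nat.div_le_self m e⟩, Nat.div_dvd_of_dvd hdvd⟩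
    · intro d hd
      simp only [Finset.mem_coe, Finset.mem_filter, Finset.mem_Ioc] at hd
      exact Nat.div_div_self hd.2 m0
    · intro e he
      simp only [Finset.mem_coe, Finset.mem_filter, Finset.mem_Icc] at he
      exact Nat.div_div_self he.1.2 m0
  -- only √m (when m is a square) is a small divisor with small codivisor
  have hover : ((Finset.Icc 1 s).filter (fun d => d ∣ m)).filter (fun e => ¬ s < m / e)
      = (if s * s = m then ({s} : Finset Nat) else ∅) := by
    ext e
    simp only [Finset.mem_filter, Finset.mem_Icc, not_lt]
    split_ifs with hsq
    · simp only [Finset.mem_singleton]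
      constructor
      · rintro ⟨⟨⟨he1, hes⟩, hdvd⟩, hme⟩
        have hme2 : e * (m / e) = m := Nat.mul_div_cancel' hdvd
        by_contra hne
        have h5 : e < s := by omega
        have h4 : e * (m / e) ≤ e * s := Nat.mul_le_mul_left e hme
        nlinarith
      · intro he
        subst he
        refine ⟨⟨⟨hs1, le_refl _⟩, ⟨e, hsq.symm⟩⟩, ?_⟩
        have : m / e = e := by rw [← hsq, Nat.mul_div_cancel_left e (by omega)]
        omega
    · simp only [Finset.notMem_empty, iff_false]
      rintro ⟨⟨⟨he1, hes⟩, hdvd⟩, hme⟩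
      have hme2 : e * (m / e) = m := Nat.mul_div_cancel' hdvd
      have : e * (m / e) ≤ s * s := Nat.mul_le_mul hes hme
      omega
  have e3 : (((Finset.Icc 1 s).filter (fun d => d ∣ m)).filter (fun e => s < m / e)).card
      + (if s * s = m then 1 else 0) = ((Finset.Icc 1 s).filter (fun d => d ∣ m)).card := by
    have := Finset.card_filter_add_card_filter_not
      (s := (Finset.Icc 1 s).filter (fun d => d ∣ m)) (fun e => s < m / e)
    rw [hover] at this
    split_ifs at this ⊢ <;> simpa using this
  have e4 : (s * s = m) → 1 ≤ ((Finset.Icc 1 s).filter (fun d => d ∣ m)).card := by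
    intro hsq
    refine Finset.card_pos.mpr ⟨s, ?_⟩
    simp only [Finset.mem_filter, Finset.mem_Icc]
    exact ⟨⟨hs1, le_refl s⟩, ⟨s, hsq.symm⟩⟩
  rw [hs, e1, e2, hsc]
  split_ifs at e3 ⊢ with hsq
  · have := e4 hsq; omega
  · omega



lemma pv_filter_len_eq (k : Int) (hk : 2 ≤ k) :
    ((PySem.List.pyRange 1 k 1).filter (fun d => PySem.Int.mod k d == 0)).length
      = pvNumProperDivisors k.toNat := by
  obtain ⟨m, hm⟩ : ∃ m : Nat, k = (m : Int) := ⟨k.toNat, (Int.toNat_of_nonneg (by omega)).symm⟩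
  have hm2 : 2 ≤ m := by omega
  subst hm
  have m0 : m ≠ 0 := by omega
  -- the left side counts proper divisors listed by range
  have hL : ((PySem.List.pyRange 1 m 1).filter (fun d => PySem.Int.mod m d == 0)).length
      = ((List.range' 1 (m - 1)).filter (fun d => m % d == 0)).length := by
    rw [PySem.List.pyRange_one, List.filter_map, List.length_map, List.range'_eq_map_range,
      List.filter_map, List.length_map]
    have hmm : ((m : Int) - 1).toNat = m - 1 := by omega
    rw [hmm]
    rw [List.filter_congr (fun j hj => ?_)]
    rw [List.mem_range] at hj
    rw [Bool.eq_iff_iff]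
    simp only [Function.comp, beq_iff_eq]
    rw [PySem.Int.mod_eq_zero_iff_dvd]
    rw [show (1 : Int) + (j : Int) = ((1 + j : Nat) : Int) by push_cast; ring]
    rw [Int.natCast_dvd_natCast, Nat.dvd_iff_mod_eq_zero]
  rw [hL, pvNumProperDivisors, Int.toNat_natCast, ← pv_card_divisors_sqrt m (by omega)]
  -- divisors.card - 1 = count of proper divisors
  have hins : m.divisors = insert m m.properDivisors := (Nat.insert_self_properDivisors m0).symm
  have hnotmem : m ∉ m.properDivisors := Nat.self_notMem_properDivisors
  rw [hins, Finset.card_insert_of_notMem hnotmem]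
  have hpd : m.properDivisors = (Finset.Ico 1 m).filter (fun d => d ∣ m) := rfl
  have : ((List.range' 1 (m - 1)).filter (fun d => m % d == 0)).length
      = ((Finset.Icc 1 (m-1)).filter (fun d => (m % d == 0) = true)).card := pv_filter_range'_card _ _
  rw [this, hpd]
  have hIcc : Finset.Icc 1 (m-1) = Finset.Ico 1 m := by
    ext y; simp [Finset.mem_Icc, Finset.mem_Ico]; omega
  rw [hIcc]
  have : ((Finset.Ico 1 m).filter (fun d => (m % d == 0) = true))
      = ((Finset.Ico 1 m).filter (fun d => d ∣ m)) := by
    refine Finset.filter_congr (fun d _ => ?_)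
    simp [beq_iff_eq, Nat.dvd_iff_mod_eq_zero]
  rw [this]
  omega

lemma pv_pre_iff (x : List Int) (k : Int) :
    Pre_admits_subsum_with_total_dividing_k x k ↔ ((PySem.List.pyRange 1 k 1).filter (fun d => PySem.Int.mod k d == 0)).length ≤ x.length := by
  by_cases hk : 2 ≤ k
  · rw [pv_filter_len_eq k hk]
    unfold Pre_admits_subsum_with_total_dividing_k
    constructor
    · intro h; exact h hk
    · intro h _; exact h
  · have : PySem.List.pyRange 1 k 1 = [] := PySem.List.pyRange_one_eq_nil (by omega)
    rw [this]
    simp [Pre_admits_subsum_with_total_dividing_k]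
    omega

lemma pv_length_mem_prod : ∀ (ls : List (List Int)) (v : List Int), v ∈ pvProd ls → v.length = ls.length := by
  intro ls
  induction ls with
  | nil => intro v hv; simp [pvProd] at hv; simp [hv]
  | cons l ls ih =>
    intro v hv
    simp [pvProd] at hv
    obtain ⟨a, _, w, hw, rfl⟩ := hv
    simp [ih w hw]

lemma pv_recB_eq (k : Int) : ∀ (ps : List (Int × Int)) (total cnt : Int),
    pvRecB k ps total cnt =
      (pvProd (ps.map (fun p => PySem.List.pyRange 0 (p.1 + 1) 1))).any
        (fun v => decide (1 < cnt + v.sum) &&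
          (PySem.Int.mod k (total + (List.zipWith (· * ·) v (ps.map Prod.snd)).sum) == 0)) := by
  intro ps
  induction ps with
  | nil =>
    intro total cnt
    simp only [pvRecB, pvProd, List.map_nil, List.any_cons, List.any_nil, Bool.or_false,
      List.zipWith_nil_right, List.sum_nil, add_zero]
    congr 1
  | cons p rest ih =>
    intro total cnt
    obtain ⟨b, d⟩ := p
    simp only [pvRecB, List.map_cons, pvProd, List.any_flatMap, List.any_map]
    refine PySem.List.any_congr_mem (fun c _ => ?_)
    rw [ih (total + c * d) (cnt + c)]
    refine PySem.List.any_congr_mem (fun v _ => ?_)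
    simp only [Function.comp, List.sum_cons, List.zipWith_cons_cons, add_assoc]
    rfl

lemma pv_map_range_getD {γ : Type} : ∀ (D : List Int) (x : List Int) (g : Int → γ),
    D.length ≤ x.length →
    (List.range D.length).map (fun i => g (x.getD i 0)) = (x.zip D).map (fun p => g p.1) := by
  intro D
  induction D with
  | nil => intro x g _; simp
  | cons d D ih =>
    intro x g h
    cases x with
    | nil => simp at h
    | cons a x =>
      simp only [List.length_cons, List.range_succ_eq_map, List.map_cons, List.map_map,
        List.zip_cons_cons]
      refine congrArg₂ List.cons rfl ?_
      simpa [Function.comp] using ih x g (by simpa using h)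

lemma pv_map_range_mul : ∀ (D y : List Int), y.length = D.length →
    (List.range D.length).map (fun i => y.getD i 0 * D.getD i 0) = List.zipWith (· * ·) y D := by
  intro D
  induction D with
  | nil => intro y h; simp
  | cons d D ih =>
    intro y h
    cases y with
    | nil => simp at h
    | cons a y =>
      simp only [List.length_cons, List.range_succ_eq_map, List.map_cons, List.map_map,
        List.zipWith_cons_cons]
      refine congrArg₂ List.cons rfl ?_
      simpa [Function.comp] using ih y (by simpa using h)

-- A's divisor loop is the filter B uses
lemma pv_properDivisors_eq (k : Int) :
    pvProperDivisors k = (PySem.List.pyRange 1 k 1).filter (fun d => PySem.Int.mod k d == 0) := by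
  unfold pvProperDivisors pvDivides
  rw [PySem.List.foldl_append_if_eq_filter]
  simp

-- cst on a member of the product is the zipWith-product sum
lemma pv_cst_eq (k : Int) (y : List Int) (h : y.length = (pvProperDivisors k).length) :
    pvCorrespondingSumTotal y k = (List.zipWith (· * ·) y (pvProperDivisors k)).sum := by
  unfold pvCorrespondingSumTotal
  simp only [PySem.List.len_eq, PySem.List.pyRange_zero_natCast, List.foldl_map,
    PySem.List.pyGetD_natCast]
  rw [PySem.List.foldl_add (g := fun i => y.getD i 0 * (pvProperDivisors k).getD i 0)]
  rw [pv_map_range_mul _ _ h]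
  simp

theorem admits_subsum_with_total_dividing_k_spec : Claim_equal_admits_subsum_with_total_dividing_k := by
  intro x k _ hpre
  have h := (pv_pre_iff x k).mp hpre
  unfold Spec_admits_subsum_with_total_dividing_k
  unfold admits_subsum_with_total_dividing_k admits_subsum_with_total_dividing_k_alt
  rw [pv_recB_eq]
  set D := (PySem.List.pyRange 1 k 1).filter (fun d => PySem.Int.mod k d == 0) with hD
  rw [show pvProperDivisors k = D from pv_properDivisors_eq k]
  simp only [PySem.List.len_eq, PySem.List.pyRange_zero_natCast, List.foldl_map,
    PySem.List.pyGetD_natCast]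
  rw [PySem.List.foldl_append_singleton_eq_map (f := fun i => PySem.List.pyRange 0 (x.getD i 0 + 1) 1)]
  rw [PySem.List.foldl_append_ite_eq_filter (p := fun v : List Int => v.sum > 1)]
  simp only [List.nil_append, List.any_filter]
  rw [pv_map_range_getD D x (fun b => PySem.List.pyRange 0 (b + 1) 1) h]
  rw [List.map_snd_zip h]
  refine PySem.List.any_congr_mem (fun v hv => ?_)
  have hlen : v.length = D.length := by
    have := pv_length_mem_prod _ v hv
    simp at this
    omega
  rw [pv_cst_eq k v (by rw [pv_properDivisors_eq]; exact hlen)]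
  rw [pv_properDivisors_eq]
  unfold pvDivides
  rw [← hD]
  simp only [zero_add, gt_iff_lt]
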